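-- pv_equiv track=rewrite | github.com/LR-Gutierrez/hack_python_2 | hack_10.py | fn_hack_10
-- ===== SOURCE A (Python) =====
-- def fn_hack_10(data):
--     datos_modificados = []
--     numero_incremental = 1
--     for item in data:
--         nuevo_item = {}
--         for valor in item.values():
--             nuevo_item[str(numero_incremental)] = str(numero_incremental + 1)
--             numero_incremental += 2
--         datos_modificados.append(nuevo_item)
--     return datos_modificados
-- ===== SOURCE B (Python) =====
-- def fn_hack_10(data):
--     # generate-then-partition: one flat run of consecutive pair strings, then slice per item
--     counts = [len(item) for item in data]
--     total = sum(counts)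
--     flat = [(str(2 * i + 1), str(2 * i + 2)) for i in range(total)]
--     out, pos = [], 0
--     for c in counts:
--         out.append(dict(flat[pos:pos + c]))
--         pos += c
--     return out
-- ===== Notes on version B (the rewrite author's own statement) =====
-- stated objective: alternative
-- what changed: Replaces the counter-threaded nested loop with a generate-then-partition shape: first count values per item, generate one flat list of consecutive (str(k), str(k+1)) pairs for the whole input, then slice it into per-item dicts.
import Mathlib
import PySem

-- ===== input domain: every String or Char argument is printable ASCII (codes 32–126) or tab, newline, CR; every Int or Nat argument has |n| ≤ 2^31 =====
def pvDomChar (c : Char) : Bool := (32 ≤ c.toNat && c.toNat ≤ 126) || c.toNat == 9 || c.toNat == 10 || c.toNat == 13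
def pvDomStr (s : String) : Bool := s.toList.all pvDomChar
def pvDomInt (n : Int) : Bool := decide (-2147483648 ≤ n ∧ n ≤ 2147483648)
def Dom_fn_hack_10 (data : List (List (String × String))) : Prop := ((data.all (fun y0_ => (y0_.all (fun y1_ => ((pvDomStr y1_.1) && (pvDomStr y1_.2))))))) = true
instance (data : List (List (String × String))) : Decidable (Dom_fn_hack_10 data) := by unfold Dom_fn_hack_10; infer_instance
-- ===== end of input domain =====

-- B re-shapes A's counter-threaded nested loop into generate-then-partition (same cost); equivalence is about return values.

-- ===== PORT A =====
-- inner loop: 'for valor in item.values(): nuevo_item[str(n)] = str(n+1); n += 2'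
def pvInnerA (vals : List String) (nuevo : PySem.Dict String String) (n : Int) :
    PySem.Dict String String × Int :=
  match vals with
  | [] => (nuevo, n)
  | _ :: vs => pvInnerA vs (nuevo.insert (PySem.Int.toStr n) (PySem.Int.toStr (n + 1))) (n + 2)

-- outer loop over the items, threading numero_incremental
def pvOuterA (data : List (List (String × String))) (n : Int) : List (List (String × String)) :=
  match data with
  | [] => []
  | item :: rest =>
      let r := pvInnerA (PySem.Dict.ofList item).values PySem.Dict.empty n
      r.1.items :: pvOuterA rest r.2

def fn_hack_10 (data : List (List (String × String))) : List (List (String × String)) :=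
  pvOuterA data 1

-- ===== PORT B =====
-- second pass of Source B: slice the flat pair list into per-item dicts
def pvPartB (flat : List (String × String)) (counts : List Nat) : List (List (String × String)) :=
  match counts with
  | [] => []
  | c :: cs => (PySem.Dict.ofList (flat.take c)).items :: pvPartB (flat.drop c) cs

def fn_hack_10_alt (data : List (List (String × String))) : List (List (String × String)) :=
  let counts := data.map (fun item => (PySem.Dict.ofList item).size)
  let total : Nat := counts.sum
  let flat := (PySem.List.pyRange 0 (total : Int) 1).map
    (fun i => (PySem.Int.toStr (2 * i + 1), PySem.Int.toStr (2 * i + 2)))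
  pvPartB flat counts

-- ===== PRECONDITION & SPEC =====
def Spec_fn_hack_10 (data : List (List (String × String))) (out : List (List (String × String))) : Prop := out = fn_hack_10_alt data
instance (data : List (List (String × String))) (out : List (List (String × String))) : Decidable (Spec_fn_hack_10 data out) := by unfold Spec_fn_hack_10; infer_instance

-- ===== CLAIM (what is proved, stated in full; the proofs are below) =====
def Claim_equal_fn_hack_10 : Prop := ∀ (data : List (List (String × String))), Dom_fn_hack_10 data → Spec_fn_hack_10 data (fn_hack_10 data)

-- ===== LEMMAS AND PROOFS =====

-- the run of consecutive pair strings starting at n, of length m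
def pvPairs (n : Int) (m : Nat) : List (String × String) :=
  match m with
  | 0 => []
  | m + 1 => (PySem.Int.toStr n, PySem.Int.toStr (n + 1)) :: pvPairs (n + 2) m

theorem pvPairs_length (n : Int) (m : Nat) : (pvPairs n m).length = m := by
  induction m generalizing n with
  | zero => rfl
  | succ m ih => simp [pvPairs, ih]

theorem pvPairs_append (n : Int) (c t : Nat) :
    pvPairs n (c + t) = pvPairs n c ++ pvPairs (n + 2 * c) t := by
  induction c generalizing n with
  | zero => simp [pvPairs]
  | succ c ih =>
      have : c + 1 + t = (c + t) + 1 := by omega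
      rw [this]
      simp only [pvPairs, ih (n + 2)]
      have h2 : n + 2 + 2 * (c : Int) = n + 2 * ((c : Nat) + 1 : Nat) := by push_cast; ring
      rw [h2]
      simp

theorem pvInnerA_eq (vals : List String) (d : PySem.Dict String String) (n : Int) :
    pvInnerA vals d n =
      ((pvPairs n vals.length).foldl (fun d p => d.insert p.1 p.2) d, n + 2 * vals.length) := by
  induction vals generalizing d n with
  | nil => simp [pvInnerA, pvPairs]
  | cons v vs ih =>
      simp only [pvInnerA, ih, List.length_cons, pvPairs, List.foldl_cons, Prod.mk.injEq, true_and]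
      push_cast; ring

theorem pvRange_map_eq_pvPairs (m : Nat) (j : Int) (hj : 0 ≤ j) :
    (PySem.List.pyRange j (j + (m : Int)) 1).map
        (fun i => (PySem.Int.toStr (2 * i + 1), PySem.Int.toStr (2 * i + 2)))
      = pvPairs (2 * j + 1) m := by
  induction m generalizing j with
  | zero => rw [PySem.List.pyRange_one_eq_nil (by omega)]; rfl
  | succ m ih =>
      rw [PySem.List.pyRange_one_cons (by omega : j < j + ((m : Nat) + 1 : Nat))]
      have h1 : j + ((m : Nat) + 1 : Nat) = (j + 1) + (m : Int) := by push_cast; ring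
      rw [List.map_cons, h1, ih (j + 1) (by omega)]
      simp only [pvPairs]
      have h2 : 2 * (j + 1) + 1 = 2 * j + 1 + 2 := by ring
      have h3 : 2 * j + 1 + 1 = 2 * j + 2 := by ring
      rw [h2, h3]

-- main invariant: the outer loop starting at counter n equals partitioning the flat run from n
theorem pvOuterA_eq_partB (data : List (List (String × String))) (n : Int) :
    pvOuterA data n =
      pvPartB (pvPairs n ((data.map (fun item => (PySem.Dict.ofList item).size)).sum))
        (data.map (fun item => (PySem.Dict.ofList item).size)) := by
  induction data generalizing n with
  | nil => rfl
  | cons item rest ih =>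
      simp only [pvOuterA, pvInnerA_eq, List.map_cons, List.sum_cons, pvPairs_append, pvPartB]
      have hv : (PySem.Dict.ofList item).values.length = (PySem.Dict.ofList item).size := by
        simp [PySem.Dict.values, PySem.Dict.size]
      rw [hv, List.take_append_of_le_length (by rw [pvPairs_length]),
        List.take_of_length_le (by rw [pvPairs_length]),
        List.drop_append_of_le_length (by rw [pvPairs_length]),
        List.drop_of_length_le (by rw [pvPairs_length]), List.nil_append, ih]
      rfl

-- ===== VERDICT (by name: the statement is the Claim_ definition above) =====
theorem fn_hack_10_spec : Claim_equal_fn_hack_10 := by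
  intro data _
  simp only [Spec_fn_hack_10, fn_hack_10, fn_hack_10_alt]
  rw [pvOuterA_eq_partB]
  have h := pvRange_map_eq_pvPairs ((data.map (fun item => (PySem.Dict.ofList item).size)).sum) 0 le_rfl
  simp only [zero_add, mul_zero] at h
  rw [h]
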